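-- pv_equiv track=rewrite | github.com/alfadaco/AdventCode2018 | 20dec2018.py | go_on_until_group_end
-- ===== SOURCE A (Python) =====
-- def go_on_until_group_end(regex):
--     counter = 0
--     while len(regex) > 0:
--         if regex[0] == '(':
--             counter += 1
--         elif regex[0] == ')':
--             counter -= 1
--             if counter < 0:
--                 return regex
--         regex = regex[1:]
--     return regex
-- ===== SOURCE B (Python) =====
-- def go_on_until_group_end(regex):
--     # Phase 1: build the running paren-balance table for the whole string.
--     balances = []
--     bal = 0
--     for c in regex:
--         bal += 1 if c == '(' else (-1 if c == ')' else 0)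
--         balances.append(bal)
--     # Phase 2: first index where the balance goes negative -> that suffix.
--     for i, b in enumerate(balances):
--         if b < 0:
--             return regex[i:]
--     return ''
-- ===== Notes on version B (the rewrite author's own statement) =====
-- stated objective: faster
-- what changed: Replaces A's interleaved consume-and-check while-loop over shrinking string slices by a two-phase pass: first build the cumulative paren-balance table, then return the suffix at the first index whose balance is negative (or '' if none).
import Mathlib
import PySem

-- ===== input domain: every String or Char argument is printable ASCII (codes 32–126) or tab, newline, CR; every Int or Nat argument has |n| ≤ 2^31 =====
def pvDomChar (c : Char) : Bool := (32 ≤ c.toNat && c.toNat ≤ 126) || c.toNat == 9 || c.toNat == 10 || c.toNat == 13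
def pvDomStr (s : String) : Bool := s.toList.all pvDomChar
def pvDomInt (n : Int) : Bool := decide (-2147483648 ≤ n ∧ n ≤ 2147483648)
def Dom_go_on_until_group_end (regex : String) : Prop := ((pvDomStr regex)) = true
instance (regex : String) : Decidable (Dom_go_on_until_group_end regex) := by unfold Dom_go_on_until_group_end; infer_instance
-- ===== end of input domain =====

-- B replaces A's interleaved consume-and-check loop by a two-phase pass (balance table, then first-negative search); objective: alternative decomposition.

-- ===== PORT A =====
-- A's while-loop: counter plus the shrinking suffix; regex[1:] = dropping the head char.
def pvGoA : List Char → Int → List Char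
  | [], _ => []
  | c :: rest, counter =>
    if c = '(' then pvGoA rest (counter + 1)
    else if c = ')' then
      (if counter - 1 < 0 then c :: rest else pvGoA rest (counter - 1))
    else pvGoA rest counter

def go_on_until_group_end (regex : String) : String :=
  String.mk (pvGoA regex.toList 0)

-- ===== PORT B =====
-- Phase 1a of Source B: per-char deltas (computed inline in the loop there).
def pvDelta (c : Char) : Int := if c = '(' then 1 else if c = ')' then -1 else 0

-- Phase 1b: cumulative balances.
def pvBals : List Char → Int → List Int
  | [], _ => []
  | c :: rest, bal => (bal + pvDelta c) :: pvBals rest (bal + pvDelta c)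

-- Phase 2: first index whose balance is negative.
def pvFirstNeg : List Int → Option Nat
  | [] => none
  | b :: rest => if b < 0 then some 0 else (pvFirstNeg rest).map (· + 1)

-- regex[i:] with 0 ≤ i ≤ len: exactly List.drop i.
def go_on_until_group_end_alt (regex : String) : String :=
  match pvFirstNeg (pvBals regex.toList 0) with
  | some i => String.mk (regex.toList.drop i)
  | none => ""

-- ===== PRECONDITION & SPEC =====
def Spec_go_on_until_group_end (regex : String) (out : String) : Prop := out = go_on_until_group_end_alt regex
instance (regex : String) (out : String) : Decidable (Spec_go_on_until_group_end regex out) := by unfold Spec_go_on_until_group_end; infer_instance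

-- ===== CLAIM (what is proved, stated in full; the proofs are below) =====
def Claim_equal_go_on_until_group_end : Prop := ∀ (regex : String), Dom_go_on_until_group_end regex → Spec_go_on_until_group_end regex (go_on_until_group_end regex)

-- ===== LEMMAS AND PROOFS =====

lemma pvGoA_eq (cs : List Char) (counter : Int) (h : 0 ≤ counter) :
    String.mk (pvGoA cs counter) =
      match pvFirstNeg (pvBals cs counter) with
      | some i => String.mk (cs.drop i)
      | none => "" := by
  induction cs generalizing counter with
  | nil => simp [pvGoA, pvBals, pvFirstNeg]; rfl
  | cons c rest ih =>
    by_cases hc : c = '('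
    · subst hc
      simp only [pvGoA, pvBals, pvFirstNeg, pvDelta, if_true]
      rw [if_neg (show ¬ (counter + 1 < 0) by omega), ih (counter + 1) (by omega)]
      cases pvFirstNeg (pvBals rest (counter + 1)) with
      | none => simp
      | some i => simp
    · by_cases hc2 : c = ')'
      · subst hc2
        by_cases hneg : counter - 1 < 0
        · have h0 : counter = 0 := by omega
          subst h0
          simp [pvGoA, pvBals, pvFirstNeg, pvDelta]
        · simp only [pvGoA, pvBals, pvFirstNeg, pvDelta]
          simp only [if_true]
          rw [if_neg hneg, if_neg hc, if_neg hc, if_neg (show ¬ (counter + -1 < 0) by omega),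
            show counter + -1 = counter - 1 by ring, ih (counter - 1) (by omega)]
          cases pvFirstNeg (pvBals rest (counter - 1)) with
          | none => simp
          | some i => simp
      · simp only [pvGoA, pvBals, pvFirstNeg, pvDelta]
        rw [if_neg hc, if_neg hc2, if_neg hc, if_neg hc2, add_zero,
          if_neg (show ¬ (counter < 0) by omega), ih counter h]
        cases pvFirstNeg (pvBals rest counter) with
        | none => simp
        | some i => simp

-- ===== VERDICT (by name: the statement is the Claim_ definition above) =====
theorem go_on_until_group_end_spec : Claim_equal_go_on_until_group_end := by
  intro regex _
  unfold Spec_go_on_until_group_end go_on_until_group_end go_on_until_group_end_alt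
  exact pvGoA_eq regex.toList 0 (by omega)
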